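-- pv_equiv track=rewrite | github.com/kyusieun/CrackMe-Writeup | CodeEngn/Advance/Advance L08/solve.py | find_name_for_key
-- ===== SOURCE A (Python) =====
-- def calculate_key(Name):
--     Name_copy = [ord(Name[0]), ord(Name[1])]
--
--     Name_copy[0] *= 0x772
--     if Name_copy[0] > 0xFFFFFFFF:
--         Name_copy[0] = Name_copy[0] & 0xFFFFFFFF
--
--     Name_copy[0] += Name_copy[0] * Name_copy[0]
--     if Name_copy[0] > 0xFFFFFFFF:
--         Name_copy[0] = Name_copy[0] & 0xFFFFFFFF
--
--     Name_copy[0] *= 0x474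
--     if Name_copy[0] > 0xFFFFFFFF:
--         Name_copy[0] = Name_copy[0] & 0xFFFFFFFF
--
--     Name_copy[0] += Name_copy[0]
--     if Name_copy[0] > 0xFFFFFFFF:
--         Name_copy[0] = Name_copy[0] & 0xFFFFFFFF
--
--     Name_copy[1] += Name_copy[0]
--     if Name_copy[1] > 0xFFFFFFFF:
--         Name_copy[1] = Name_copy[1] & 0xFFFFFFFF
--
--     Name_copy[1] *= 0x772
--     if Name_copy[1] > 0xFFFFFFFF:
--         Name_copy[1] = Name_copy[1] & 0xFFFFFFFF
--
--     Name_copy[1] += Name_copy[1] * Name_copy[1]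
--     if Name_copy[1] > 0xFFFFFFFF:
--         Name_copy[1] = Name_copy[1] & 0xFFFFFFFF
--
--     Name_copy[1] *= 0x474
--     if Name_copy[1] > 0xFFFFFFFF:
--         Name_copy[1] = Name_copy[1] & 0xFFFFFFFF
--
--     Name_copy[1] += Name_copy[1]
--     if Name_copy[1] > 0xFFFFFFFF:
--         Name_copy[1] = Name_copy[1] & 0xFFFFFFFF
--
--     Key = Name_copy[1]
--     return Key
--
-- def find_name_for_key(target_key_prefix):
--     for char1 in range(32, 127):  # ASCII range
--         for char2 in range(32, 127):
--             Name = [chr(char1), chr(char2)]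
--             Key = calculate_key(Name)
--             if (Key >> 16) == target_key_prefix:
--                 return Name, Key
--     return None, None
-- ===== SOURCE B (Python) =====
-- def calculate_key(Name):
--     Name_copy = [ord(Name[0]), ord(Name[1])]
--
--     Name_copy[0] *= 0x772
--     if Name_copy[0] > 0xFFFFFFFF:
--         Name_copy[0] = Name_copy[0] & 0xFFFFFFFF
--
--     Name_copy[0] += Name_copy[0] * Name_copy[0]
--     if Name_copy[0] > 0xFFFFFFFF:
--         Name_copy[0] = Name_copy[0] & 0xFFFFFFFF
--
--     Name_copy[0] *= 0x474
--     if Name_copy[0] > 0xFFFFFFFF: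
--         Name_copy[0] = Name_copy[0] & 0xFFFFFFFF
--
--     Name_copy[0] += Name_copy[0]
--     if Name_copy[0] > 0xFFFFFFFF:
--         Name_copy[0] = Name_copy[0] & 0xFFFFFFFF
--
--     Name_copy[1] += Name_copy[0]
--     if Name_copy[1] > 0xFFFFFFFF:
--         Name_copy[1] = Name_copy[1] & 0xFFFFFFFF
--
--     Name_copy[1] *= 0x772
--     if Name_copy[1] > 0xFFFFFFFF:
--         Name_copy[1] = Name_copy[1] & 0xFFFFFFFF
--
--     Name_copy[1] += Name_copy[1] * Name_copy[1]
--     if Name_copy[1] > 0xFFFFFFFF: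
--         Name_copy[1] = Name_copy[1] & 0xFFFFFFFF
--
--     Name_copy[1] *= 0x474
--     if Name_copy[1] > 0xFFFFFFFF:
--         Name_copy[1] = Name_copy[1] & 0xFFFFFFFF
--
--     Name_copy[1] += Name_copy[1]
--     if Name_copy[1] > 0xFFFFFFFF:
--         Name_copy[1] = Name_copy[1] & 0xFFFFFFFF
--
--     Key = Name_copy[1]
--     return Key
--
-- def find_name_for_key(target_key_prefix):
--     # Build a first-seen index: prefix -> (Name, Key) over the whole search space,
--     # then answer the query by a single lookup.
--     table = {}
--     for char1 in range(32, 127):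
--         for char2 in range(32, 127):
--             Name = [chr(char1), chr(char2)]
--             Key = calculate_key(Name)
--             prefix = Key >> 16
--             if prefix not in table:
--                 table[prefix] = (Name, Key)
--     hit = table.get(target_key_prefix)
--     if hit is None:
--         return None, None
--     return hit
-- ===== Notes on version B (the rewrite author's own statement) =====
-- stated objective: alternative
-- what changed: find_name_for_key no longer early-exits a nested scan: it builds a first-seen dict index prefix -> (Name, Key) over the full 95x95 space once and answers the query by a single dict lookup.
import Mathlib
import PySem

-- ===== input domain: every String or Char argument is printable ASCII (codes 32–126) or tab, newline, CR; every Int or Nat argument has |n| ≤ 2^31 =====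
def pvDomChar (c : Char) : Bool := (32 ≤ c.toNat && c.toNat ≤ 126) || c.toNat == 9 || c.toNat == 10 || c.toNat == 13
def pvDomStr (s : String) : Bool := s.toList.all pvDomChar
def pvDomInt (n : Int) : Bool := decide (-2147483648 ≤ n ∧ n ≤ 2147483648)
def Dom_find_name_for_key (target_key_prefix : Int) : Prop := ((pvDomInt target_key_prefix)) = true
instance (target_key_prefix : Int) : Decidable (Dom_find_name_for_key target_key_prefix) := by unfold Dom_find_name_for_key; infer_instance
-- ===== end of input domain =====

-- B replaces A's early-exit nested scan with a first-seen dict index over the same 95×95 space,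
-- answered by one lookup (objective: alternative decomposition, same asymptotic cost).

-- ===== PORT A =====
-- ord(s): exact for the single-character strings both programs construct with chr
def pvOrd (s : String) : Int :=
  match s.toList with
  | [c] => (c.toNat : Int)
  | _ => 0

-- chr(n) for 32 ≤ n ≤ 126 as used by both programs
def pvChr (n : Int) : String := String.ofList [Char.ofNat n.toNat]

-- the repeated pattern `if x > 0xFFFFFFFF: x = x & 0xFFFFFFFF`
def pvMask32 (x : Int) : Int :=
  if x > 0xFFFFFFFF then PySem.Int.band x 0xFFFFFFFF else x

def calculate_key (Name : List String) : Int :=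
  let c0 := pvOrd (PySem.List.pyGetD Name 0 "")
  let c1 := pvOrd (PySem.List.pyGetD Name 1 "")
  let c0 := pvMask32 (c0 * 0x772)
  let c0 := pvMask32 (c0 + c0 * c0)
  let c0 := pvMask32 (c0 * 0x474)
  let c0 := pvMask32 (c0 + c0)
  let c1 := pvMask32 (c1 + c0)
  let c1 := pvMask32 (c1 * 0x772)
  let c1 := pvMask32 (c1 + c1 * c1)
  let c1 := pvMask32 (c1 * 0x474)
  let c1 := pvMask32 (c1 + c1)
  c1

def find_name_for_key (target_key_prefix : Int) : Option (List String) × Option Int :=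
  match (PySem.List.pyRange 32 127 1).findSome? (fun char1 =>
      (PySem.List.pyRange 32 127 1).findSome? (fun char2 =>
        let Name := [pvChr char1, pvChr char2]
        let Key := calculate_key Name
        if Key >>> (16 : Nat) = target_key_prefix then some (Name, Key) else none)) with
  | some (n, k) => (some n, some k)
  | none => (none, none)

-- ===== PORT B =====
-- body of B's inner loop: insert (prefix ↦ (Name, Key)) only when the prefix is unseen
def pvStep (d : PySem.Dict Int (List String × Int)) (char1 char2 : Int) :
    PySem.Dict Int (List String × Int) :=
  let Name := [pvChr char1, pvChr char2]
  let Key := calculate_key Name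
  let pfx := Key >>> (16 : Nat)
  if d.contains pfx then d else d.insert pfx (Name, Key)

-- `hit = table.get(target_key_prefix); return hit if hit is not None else (None, None)`
def pvLookup (hit : Option (List String × Int)) : Option (List String) × Option Int :=
  match hit with
  | some (n, k) => (some n, some k)
  | none => (none, none)

def find_name_for_key_alt (target_key_prefix : Int) : Option (List String) × Option Int :=
  pvLookup (((PySem.List.pyRange 32 127 1).foldl (fun d char1 =>
      (PySem.List.pyRange 32 127 1).foldl (fun d char2 => pvStep d char1 char2) d)
      PySem.Dict.empty).get? target_key_prefix)

-- ===== PRECONDITION & SPEC =====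
def Spec_find_name_for_key (target_key_prefix : Int) (out : Option (List String) × Option Int) : Prop := out = find_name_for_key_alt target_key_prefix
instance (target_key_prefix : Int) (out : Option (List String) × Option Int) : Decidable (Spec_find_name_for_key target_key_prefix out) := by unfold Spec_find_name_for_key; infer_instance

-- ===== CLAIM (what is proved, stated in full; the proofs are below) =====
def Claim_equal_find_name_for_key : Prop := ∀ (target_key_prefix : Int), Dom_find_name_for_key target_key_prefix → Spec_find_name_for_key target_key_prefix (find_name_for_key target_key_prefix)

-- ===== LEMMAS AND PROOFS =====

-- first-insert-wins dict build over one list ↔ first-match scan of that list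
theorem pvFoldl_get? {α β : Type} (key : α → Int) (val : α → β)
    (xs : List α) (d : PySem.Dict Int β) (t : Int) :
    (xs.foldl (fun d x => if d.contains (key x) then d else d.insert (key x) (val x)) d).get? t
      = (d.get? t).or (xs.findSome? (fun x => if key x = t then some (val x) else none)) := by
  induction xs generalizing d with
  | nil => simp [List.findSome?]
  | cons x xs ih =>
    simp only [List.foldl_cons, List.findSome?]
    rw [ih]
    by_cases hk : key x = t
    · subst hk
      by_cases hc : d.contains (key x) = true
      · obtain ⟨w, hw⟩ := Option.isSome_iff_exists.mp
          (show (d.get? (key x)).isSome = true by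
            rw [← PySem.Dict.contains_eq_isSome_get?]; exact hc)
        simp [hc, hw, Option.or]
      · have hn : d.get? (key x) = none := Option.not_isSome_iff_eq_none.mp
          (by rw [← PySem.Dict.contains_eq_isSome_get?]; simpa using hc)
        simp [hc, hn, PySem.Dict.get?_insert_self, Option.or]
    · have hstep : (if d.contains (key x) then d else d.insert (key x) (val x)).get? t = d.get? t := by
        by_cases hc : d.contains (key x) = true
        · simp [hc]
        · simp [hc, PySem.Dict.get?_insert_of_ne d (val x) (Ne.symm hk)]
      simp [hstep, hk]

-- the nested build over both ranges ↔ A's nested first-match scan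
theorem pvNested (l1 l2 : List Int) (d : PySem.Dict Int (List String × Int)) (t : Int) :
    (l1.foldl (fun d char1 => l2.foldl (fun d char2 => pvStep d char1 char2) d) d).get? t
      = (d.get? t).or (l1.findSome? (fun char1 => l2.findSome? (fun char2 =>
          let Name := [pvChr char1, pvChr char2]
          let Key := calculate_key Name
          if Key >>> (16 : Nat) = t then some (Name, Key) else none))) := by
  induction l1 generalizing d with
  | nil => simp [List.findSome?]
  | cons c1 l1 ih =>
    simp only [List.foldl_cons, List.findSome?]
    rw [ih]
    have hinner := pvFoldl_get? (α := Int)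
      (fun char2 => calculate_key [pvChr c1, pvChr char2] >>> (16 : Nat))
      (fun char2 => ([pvChr c1, pvChr char2], calculate_key [pvChr c1, pvChr char2])) l2 d t
    have hfold : (l2.foldl (fun d char2 => pvStep d c1 char2) d)
        = (l2.foldl (fun d x =>
            if d.contains (calculate_key [pvChr c1, pvChr x] >>> (16 : Nat)) then d
            else d.insert (calculate_key [pvChr c1, pvChr x] >>> (16 : Nat))
              ([pvChr c1, pvChr x], calculate_key [pvChr c1, pvChr x])) d) := by
      simp only [pvStep]
    rw [hfold, hinner]
    cases hs : l2.findSome? (fun x =>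
        if calculate_key [pvChr c1, pvChr x] >>> (16 : Nat) = t
        then some ([pvChr c1, pvChr x], calculate_key [pvChr c1, pvChr x]) else none) with
    | none => cases d.get? t <;> simp [Option.or]
    | some w => cases d.get? t <;> simp [Option.or]

-- ===== VERDICT (by name: the statement is the Claim_ definition above) =====
theorem find_name_for_key_spec : Claim_equal_find_name_for_key := by
  intro t _
  unfold Spec_find_name_for_key find_name_for_key find_name_for_key_alt
  rw [pvNested, PySem.Dict.get?_empty, Option.none_or]
  cases hbig : (PySem.List.pyRange 32 127 1).findSome? (fun char1 =>
      (PySem.List.pyRange 32 127 1).findSome? (fun char2 =>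
        let Name := [pvChr char1, pvChr char2]
        let Key := calculate_key Name
        if Key >>> (16 : Nat) = t then some (Name, Key) else none)) with
  | none => rfl
  | some w => obtain ⟨n, k⟩ := w; rfl
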